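-- pv_equiv track=rewrite | github.com/ScopeX-ASU/LiDAR | src/picroute/routing/astarsearch.py | _mergePath
-- ===== SOURCE A (Python) =====
-- from typing import Dict, List, Optional, Tuple, Union
--
-- def _mergePath(path: List[Tuple[int]]) -> List[Tuple[int]]:
--     vec = []
--     if len(path) == 1:
--         vec.append(path[0][0:2])
--         return vec
--     if len(path) == 2:
--         vec.append(path[0][0:2])
--         vec.append(path[1][0:2])
--         return vec
--
--     i = 0
--     k = len(path)
--     for j in range(1, k + 1):
--         if j != k:
--             if i == j:
--                 continue
--             v1 = path[j]
--             # same direction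
--             if path[i][2] == v1[2]:
--                 continue
--
--             angle = abs(v1[2] - path[i][2])
--             if angle > 180:
--                 angle = 360 - angle
--             if angle == 45:
--                 vec.append(path[i][0:2])
--                 # more than two node in the same direction, add the second point of the segment
--                 if i != j - 1:
--                     vec.append(path[j - 1][0:2])
--                     i = j
--                 else:
--                     i = j
--             # angle == 90, add the inflection node, ignore the intermediate node
--             elif path[i][2] == 180:
--                 vec.append(path[i][0:2])
--                 vec.append((path[j - 1][0] - 5, path[j - 1][1]))
--                 i = j
--             elif path[i][2] == 0:
--                 vec.append(path[i][0:2])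
--                 vec.append((path[j - 1][0] + 5, path[j - 1][1]))
--                 i = j
--             elif path[i][2] == 90:
--                 vec.append(path[i][0:2])
--                 vec.append((path[j - 1][0], path[j - 1][1] + 5))
--                 i = j
--             else:
--                 vec.append(path[i][0:2])
--                 vec.append((path[j - 1][0], path[j - 1][1] - 5))
--                 i = j
--         else:  # The last node
--             if i == k - 1:
--                 vec.append(path[i][0:2])
--             else:
--                 vec.append(path[i][0:2])
--                 vec.append(path[k - 1][0:2])
--
--     return vec
-- ===== SOURCE B (Python) =====
-- def _mergePath(path):
--     k = len(path)
--     if k == 1: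
--         return [path[0][0:2]]
--     if k == 2:
--         return [path[0][0:2], path[1][0:2]]
--     if k == 0:
--         return []
--     # Pass 1: run boundaries -- indices where the direction changes, bracketed by 0 and k.
--     bounds = [0] + [j for j in range(1, k) if path[j][2] != path[j - 1][2]] + [k]
--     # Pass 2: emit each run's vertices.
--     vec = []
--     for s, e in zip(bounds, bounds[1:]):
--         vec.append(path[s][0:2])
--         if e == k:
--             if e - s > 1:
--                 vec.append(path[k - 1][0:2])
--         else:
--             angle = abs(path[e][2] - path[s][2])
--             if angle > 180:
--                 angle = 360 - angle
--             x, y = path[e - 1][0], path[e - 1][1]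
--             if angle == 45:
--                 if e - s > 1:
--                     vec.append((x, y))
--             elif path[s][2] == 180:
--                 vec.append((x - 5, y))
--             elif path[s][2] == 0:
--                 vec.append((x + 5, y))
--             elif path[s][2] == 90:
--                 vec.append((x, y + 5))
--             else:
--                 vec.append((x, y - 5))
--     return vec
-- ===== Notes on version B (the rewrite author's own statement) =====
-- stated objective: alternative
-- what changed: Replaces A's interleaved i/j state machine with two passes: first segment the path into maximal collinear runs by collecting boundary indices, then emit each run's vertices by folding over adjacent boundary pairs.
import Mathlib
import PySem

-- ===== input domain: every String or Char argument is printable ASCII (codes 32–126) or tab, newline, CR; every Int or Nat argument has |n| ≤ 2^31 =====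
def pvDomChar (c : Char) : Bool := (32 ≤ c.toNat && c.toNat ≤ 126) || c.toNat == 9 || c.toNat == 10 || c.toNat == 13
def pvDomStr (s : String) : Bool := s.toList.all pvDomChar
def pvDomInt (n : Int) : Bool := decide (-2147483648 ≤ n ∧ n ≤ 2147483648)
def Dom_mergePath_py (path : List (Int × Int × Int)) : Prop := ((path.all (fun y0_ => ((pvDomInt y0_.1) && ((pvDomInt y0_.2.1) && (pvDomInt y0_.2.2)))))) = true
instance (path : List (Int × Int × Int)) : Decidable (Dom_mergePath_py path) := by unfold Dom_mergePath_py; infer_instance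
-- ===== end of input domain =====

-- B replaces A's interleaved i/j state machine with two passes (collect run boundaries, then
-- emit per run); same O(n) cost, equivalence proved for the return value.

-- Shared helpers: path[j] for an in-range nonnegative index (both Pythons only index in range,
-- where List.getD is exact), p[0:2], and p[2].
def pvTrip (path : List (Int × Int × Int)) (j : Nat) : Int × Int × Int := path.getD j (0, 0, 0)
def pvPt (p : Int × Int × Int) : Int × Int := (p.1, p.2.1)
def pvDir (p : Int × Int × Int) : Int := p.2.2

-- ===== PORT A =====
-- one iteration of A's `for j in range(1, k + 1)` loop over the state (i, vec)
def pvStepA (path : List (Int × Int × Int)) (k : Nat) (st : Nat × List (Int × Int)) (j : Nat) :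
    Nat × List (Int × Int) :=
  let i := st.1
  let vec := st.2
  if j ≠ k then
    if i = j then st
    else
      let v1 := pvTrip path j
      let pi := pvTrip path i
      if pvDir pi = pvDir v1 then st
      else
        let angle0 := |pvDir v1 - pvDir pi|
        let angle := if angle0 > 180 then 360 - angle0 else angle0
        let pj1 := pvTrip path (j - 1)
        if angle = 45 then
          if i ≠ j - 1 then (j, vec ++ [pvPt pi, pvPt pj1])
          else (j, vec ++ [pvPt pi])
        else if pvDir pi = 180 then (j, vec ++ [pvPt pi, (pj1.1 - 5, pj1.2.1)])
        else if pvDir pi = 0 then (j, vec ++ [pvPt pi, (pj1.1 + 5, pj1.2.1)])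
        else if pvDir pi = 90 then (j, vec ++ [pvPt pi, (pj1.1, pj1.2.1 + 5)])
        else (j, vec ++ [pvPt pi, (pj1.1, pj1.2.1 - 5)])
  else
    if i = k - 1 then (i, vec ++ [pvPt (pvTrip path i)])
    else (i, vec ++ [pvPt (pvTrip path i), pvPt (pvTrip path (k - 1))])

def mergePath_py (path : List (Int × Int × Int)) : List (Int × Int) :=
  if path.length = 1 then [pvPt (pvTrip path 0)]
  else if path.length = 2 then [pvPt (pvTrip path 0), pvPt (pvTrip path 1)]
  else
    let k := path.length
    ((List.range' 1 k).foldl (pvStepA path k) (0, [])).2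

-- ===== PORT B =====
-- Source B's per-run emission (the body of `for s, e in zip(bounds, bounds[1:])`)
def pvEmitB (path : List (Int × Int × Int)) (k : Nat) (vec : List (Int × Int))
    (se : Nat × Nat) : List (Int × Int) :=
  let s := se.1
  let e := se.2
  let vec := vec ++ [pvPt (pvTrip path s)]
  if e = k then
    if e - s > 1 then vec ++ [pvPt (pvTrip path (k - 1))] else vec
  else
    let angle0 := |pvDir (pvTrip path e) - pvDir (pvTrip path s)|
    let angle := if angle0 > 180 then 360 - angle0 else angle0
    let x := (pvTrip path (e - 1)).1
    let y := (pvTrip path (e - 1)).2.1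
    if angle = 45 then
      if e - s > 1 then vec ++ [(x, y)] else vec
    else if pvDir (pvTrip path s) = 180 then vec ++ [(x - 5, y)]
    else if pvDir (pvTrip path s) = 0 then vec ++ [(x + 5, y)]
    else if pvDir (pvTrip path s) = 90 then vec ++ [(x, y + 5)]
    else vec ++ [(x, y - 5)]

def mergePath_py_alt (path : List (Int × Int × Int)) : List (Int × Int) :=
  let k := path.length
  if k = 1 then [pvPt (pvTrip path 0)]
  else if k = 2 then [pvPt (pvTrip path 0), pvPt (pvTrip path 1)]
  else if k = 0 then []
  else
    let bounds := [0] ++ ((List.range' 1 (k - 1)).filter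
        (fun j => pvDir (pvTrip path j) ≠ pvDir (pvTrip path (j - 1)))) ++ [k]
    (bounds.zip (bounds.drop 1)).foldl (pvEmitB path k) []

-- ===== PRECONDITION & SPEC =====
def Spec_mergePath_py (path : List (Int × Int × Int)) (out : List (Int × Int)) : Prop := out = mergePath_py_alt path
instance (path : List (Int × Int × Int)) (out : List (Int × Int)) : Decidable (Spec_mergePath_py path out) := by unfold Spec_mergePath_py; infer_instance

-- ===== CLAIM (what is proved, stated in full; the proofs are below) =====
def Claim_equal_mergePath_py : Prop := ∀ (path : List (Int × Int × Int)), Dom_mergePath_py path → Spec_mergePath_py path (mergePath_py path)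

-- ===== LEMMAS AND PROOFS =====

theorem pv_filter_range'_nil {P : Nat → Bool} {a n : Nat}
    (h : (List.range' a n).filter P = []) :
    ∀ m, a ≤ m → m < a + n → ¬ (P m = true) := by
  intro m hm1 hm2 hP
  have hmem : m ∈ (List.range' a n).filter P := by
    rw [List.mem_filter]
    exact ⟨by rw [List.mem_range'_1]; omega, hP⟩
  rw [h] at hmem
  exact absurd hmem (List.not_mem_nil)

theorem pv_filter_range'_cons {P : Nat → Bool} {e : Nat} {rest : List Nat} :
    ∀ {n a : Nat}, (List.range' a n).filter P = e :: rest →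
    a ≤ e ∧ e < a + n ∧ P e = true ∧ (∀ m, a ≤ m → m < e → ¬ (P m = true)) ∧
      rest = (List.range' (e + 1) (a + n - (e + 1))).filter P := by
  intro n
  induction n with
  | zero => intro a h; simp at h
  | succ n ih =>
    intro a h
    rw [List.range'_succ, List.filter_cons] at h
    by_cases hPa : P a = true
    · simp only [hPa, if_pos] at h
      injection h with he hr
      subst he
      refine ⟨le_refl _, by omega, hPa, by omega, ?_⟩
      have hn : a + (n + 1) - (a + 1) = n := by omega
      rw [hn]; exact hr.symm
    · simp only [hPa, Bool.false_eq_true, if_false] at h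
      obtain ⟨h1, h2, h3, h4, h5⟩ := ih h
      refine ⟨by omega, by omega, h3, ?_, ?_⟩
      · intro m hm1 hm2
        rcases Nat.eq_or_lt_of_le hm1 with rfl | hlt
        · exact hPa
        · exact h4 m hlt hm2
      · have : a + 1 + n = a + (n + 1) := by omega
        rwa [this] at h5

-- directions propagate through a run: if no interior change, every element has the start's direction
theorem pv_dir_run (path : List (Int × Int × Int)) (s e : Nat)
    (h : ∀ m, s < m → m < e → pvDir (pvTrip path m) = pvDir (pvTrip path (m - 1))) :
    ∀ m, s ≤ m → m < e → pvDir (pvTrip path m) = pvDir (pvTrip path s) := by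
  intro m
  induction m with
  | zero =>
    intro h1 _
    have hs : s = 0 := by omega
    subst hs
    rfl
  | succ m ih =>
    intro h1 h2
    rcases Nat.eq_or_lt_of_le h1 with heq | hlt
    · rw [← heq]
    · have hstep := h (m + 1) hlt h2
      simp only [Nat.add_sub_cancel] at hstep
      rw [hstep]
      exact ih (by omega) (by omega)

-- A's loop skips every index inside a run
theorem pv_skip (path : List (Int × Int × Int)) (k : Nat) :
    ∀ (n s : Nat) (vec : List (Int × Int)), s + n < k →
    (∀ m, s < m → m ≤ s + n → pvDir (pvTrip path m) = pvDir (pvTrip path s)) →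
    (List.range' (s + 1) n).foldl (pvStepA path k) (s, vec) = (s, vec) := by
  intro n
  induction n with
  | zero => intro s vec _ _; simp
  | succ n ih =>
    intro s vec hk hdir
    rw [List.range'_1_concat, List.foldl_append]
    rw [ih s vec (by omega) (fun m h1 h2 => hdir m h1 (by omega))]
    show pvStepA path k (s, vec) (s + 1 + n) = (s, vec)
    have hj : s + 1 + n ≠ k := by omega
    have hij : s ≠ s + 1 + n := by omega
    have hd : pvDir (pvTrip path s) = pvDir (pvTrip path (s + 1 + n)) :=
      (hdir (s + 1 + n) (by omega) (by omega)).symm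
    simp [pvStepA, hj, hij, hd]

-- A's step at a turn index equals B's per-run emission (non-final run)
theorem pv_turn_step (path : List (Int × Int × Int)) (k s e : Nat) (vec : List (Int × Int))
    (hse : s < e) (hek : e < k)
    (hd : pvDir (pvTrip path s) ≠ pvDir (pvTrip path e)) :
    pvStepA path k (s, vec) e = (e, pvEmitB path k vec (s, e)) := by
  have hj : e ≠ k := by omega
  have hij : s ≠ e := by omega
  have h1 : (s ≠ e - 1) ↔ (e - s > 1) := by omega
  simp only [pvStepA, pvEmitB, hj, hij, hd, h1, if_neg, ne_eq]
  split_ifs <;> simp_all [pvPt, List.append_assoc]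

-- A's final step (j = k) equals B's final-run emission
theorem pv_final_step (path : List (Int × Int × Int)) (k s : Nat) (vec : List (Int × Int))
    (hs : s < k) :
    (pvStepA path k (s, vec) k).2 = pvEmitB path k vec (s, k) := by
  have h1 : (s = k - 1) ↔ ¬ (k - s > 1) := by omega
  simp only [pvStepA, pvEmitB, h1, ite_not, if_neg (by omega : ¬ k ≠ k), if_pos rfl]
  split_ifs <;> simp [pvPt, List.append_assoc]

-- main invariant: from run start s with the remaining turn indices ts,
-- A's remaining loop produces exactly B's fold over the remaining boundary pairs
theorem pv_main (path : List (Int × Int × Int)) (k : Nat) (hk : k = path.length) :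
    ∀ (ts : List Nat) (s : Nat) (vec : List (Int × Int)), s < k →
    ts = (List.range' (s + 1) (k - 1 - s)).filter
        (fun j => pvDir (pvTrip path j) ≠ pvDir (pvTrip path (j - 1))) →
    ((List.range' (s + 1) (k - s)).foldl (pvStepA path k) (s, vec)).2 =
      ((s :: (ts ++ [k])).zip ((ts ++ [k]))).foldl (pvEmitB path k) vec := by
  intro ts
  induction ts with
  | nil =>
    intro s vec hs hts
    have hnot := pv_filter_range'_nil hts.symm
    have hrun : ∀ m, s ≤ m → m < k → pvDir (pvTrip path m) = pvDir (pvTrip path s) := by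
      apply pv_dir_run
      intro m h1 h2
      by_contra hne
      exact hnot m (by omega) (by omega) (by simpa using hne)
    have hsplit : List.range' (s + 1) (k - s) =
        List.range' (s + 1) (k - 1 - s) ++ [k] := by
      have h1 : k - s = (k - 1 - s) + 1 := by omega
      rw [h1, List.range'_1_concat]
      congr 1; simp; omega
    rw [hsplit, List.foldl_append]
    rw [pv_skip path k (k - 1 - s) s vec (by omega)
      (fun m h1 h2 => hrun m (by omega) (by omega))]
    simp only [List.nil_append, List.zip, List.zipWith, List.foldl]
    exact pv_final_step path k s vec hs
  | cons e rest ih =>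
    intro s vec hs hts
    obtain ⟨h1, h2, h3, h4, h5⟩ := pv_filter_range'_cons hts.symm
    have he_lt : e < k := by omega
    have hrun : ∀ m, s ≤ m → m < e → pvDir (pvTrip path m) = pvDir (pvTrip path s) := by
      apply pv_dir_run
      intro m hm1 hm2
      by_contra hne
      exact h4 m (by omega) (by omega) (by simpa using hne)
    have hde : pvDir (pvTrip path s) ≠ pvDir (pvTrip path e) := by
      intro hEq
      have h3' : pvDir (pvTrip path e) ≠ pvDir (pvTrip path (e - 1)) := by simpa using h3
      have h9 := hrun (e - 1) (by omega) (by omega)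
      apply h3'
      rw [h9]
      exact hEq.symm
    -- split the range at e
    have hsplit : List.range' (s + 1) (k - s) =
        (List.range' (s + 1) (e - 1 - s) ++ [e]) ++ List.range' (e + 1) (k - e) := by
      have hcat : List.range' (s + 1) (e - 1 - s) ++ [e] = List.range' (s + 1) (e - s) := by
        have h0 : e - s = (e - 1 - s) + 1 := by omega
        rw [h0, List.range'_1_concat]
        congr 2; omega
      rw [hcat]
      rw [show k - s = (e - s) + (k - e) from by omega]
      rw [← List.range'_append_1]
      congr 2
      omega
    rw [hsplit, List.foldl_append, List.foldl_append]
    rw [pv_skip path k (e - 1 - s) s vec (by omega)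
      (fun m hm1 hm2 => hrun m (by omega) (by omega))]
    simp only [List.foldl]
    rw [pv_turn_step path k s e vec (by omega) he_lt hde]
    have hrest : rest = (List.range' (e + 1) (k - 1 - e)).filter
        (fun j => pvDir (pvTrip path j) ≠ pvDir (pvTrip path (j - 1))) := by
      rw [h5]; congr 1; congr 1; omega
    have := ih e (pvEmitB path k vec (s, e)) he_lt hrest
    rw [this]
    simp [List.zip]

-- ===== VERDICT (by name: the statement is the Claim_ definition above) =====
theorem mergePath_py_spec : Claim_equal_mergePath_py := by
  intro path _
  unfold Spec_mergePath_py mergePath_py mergePath_py_alt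
  by_cases h1 : path.length = 1
  · simp [h1]
  · by_cases h2 : path.length = 2
    · simp [h1, h2]
    · by_cases h0 : path.length = 0
      · simp [h0, h1, h2, List.range']
      · simp only [h0, h1, h2, if_false]
        have := pv_main path path.length rfl
          ((List.range' 1 (path.length - 1)).filter
            (fun j => pvDir (pvTrip path j) ≠ pvDir (pvTrip path (j - 1))))
          0 [] (by omega) (by norm_num)
        simpa using this
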